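-- pv_equiv track=rewrite | github.com/kac460/advent-of-code-2023 | day-11/part_1.py | expanded_universe
-- ===== SOURCE A (Python) =====
-- def expanded_universe(unexpanded_universe: list[str]) -> list[list[str]]:
--     col_has_galaxy = {
--         col: False
--         for col in range(len(unexpanded_universe[0]))
--     }
--     expanded_rows_universe: list[str] = []
--     for row in range(len(unexpanded_universe)):
--         expanded_rows_universe.append(unexpanded_universe[row])
--         if '#' not in unexpanded_universe[row]:
--             expanded_rows_universe.append(unexpanded_universe[row])
--         for col in range(len(unexpanded_universe[row])):
--             if unexpanded_universe[row][col] == '#':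
--                 col_has_galaxy[col] = True
--     expanded_universe: list[list[str]] = []
--     for row in range(len(expanded_rows_universe)):
--         expanded_universe.append([])
--         for col in range(len(expanded_rows_universe[row])):
--             expanded_universe[row].append(expanded_rows_universe[row][col])
--             if not col_has_galaxy[col]:
--                 expanded_universe[row].append(expanded_rows_universe[row][col])
--     return expanded_universe
-- ===== SOURCE B (Python) =====
-- def expanded_universe(unexpanded_universe: list) -> list:
--     galaxy_cols = {c for row in unexpanded_universe
--                    for c, ch in enumerate(row) if ch == '#'}
--     result = []
--     for row in unexpanded_universe:
--         expanded = [ch for c, ch in enumerate(row)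
--                     for _ in range(1 if c in galaxy_cols else 2)]
--         result.append(expanded)
--         if '#' not in row:
--             result.append(list(expanded))
--     return result
-- ===== Notes on version B (the rewrite author's own statement) =====
-- stated objective: alternative
-- what changed: A builds a per-column dict of flags updated cell by cell and then expands columns in a second pass of nested index loops; B computes the set of galaxy columns once with a set comprehension and then makes a single pass that builds each expanded row as one comprehension and reuses it for the empty-row duplicate.
import Mathlib
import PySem

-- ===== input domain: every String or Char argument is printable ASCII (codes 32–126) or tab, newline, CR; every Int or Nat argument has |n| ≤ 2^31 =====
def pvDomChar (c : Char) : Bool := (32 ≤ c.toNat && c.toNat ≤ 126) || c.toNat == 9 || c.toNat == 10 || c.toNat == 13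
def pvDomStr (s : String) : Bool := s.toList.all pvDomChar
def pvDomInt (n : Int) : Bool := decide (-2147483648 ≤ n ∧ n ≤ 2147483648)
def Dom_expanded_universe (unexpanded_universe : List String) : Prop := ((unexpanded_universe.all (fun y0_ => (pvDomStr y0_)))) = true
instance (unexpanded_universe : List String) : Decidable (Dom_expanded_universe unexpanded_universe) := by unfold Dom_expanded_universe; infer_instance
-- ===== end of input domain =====

-- B replaces A's incrementally-built dict of column flags and twin index loops by a set comprehension of galaxy columns plus one pass that builds each expanded row once and reuses it (objective: alternative decomposition, same asymptotic cost).

-- ===== PORT A =====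
-- inner column loop of A's first pass: for col in range(len(row)): if row[col] == '#': col_has_galaxy[col] = True
def pvAUpdRow (row : String) (d : PySem.Dict Int Bool) : PySem.Dict Int Bool :=
  (PySem.List.enumerate row.toList 0).foldl
    (fun d p => if p.2 = '#' then d.insert p.1 true else d) d

def expanded_universe (unexpanded_universe : List String) : List (List String) :=
  match unexpanded_universe with
  | [] => []  -- Python raises IndexError on unexpanded_universe[0]; outside Pre_
  | r0 :: _ =>
    -- col_has_galaxy = {col: False for col in range(len(unexpanded_universe[0]))}
    let d0 : PySem.Dict Int Bool :=
      (PySem.List.pyRange 0 (PySem.Str.len r0) 1).foldl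
        (fun d c => d.insert c false) PySem.Dict.empty
    -- first loop: build expanded_rows_universe and update col_has_galaxy
    let st := unexpanded_universe.foldl
      (fun (st : List String × PySem.Dict Int Bool) row =>
        let rows := st.1 ++ [row]
        let rows := if PySem.Str.isIn "#" row then rows else rows ++ [row]
        (rows, pvAUpdRow row st.2))
      ([], d0)
    -- second loop: expand columns
    st.1.foldl
      (fun out row =>
        out ++ [(PySem.List.enumerate row.toList 0).foldl
          (fun acc p =>
            let acc := acc ++ [String.singleton p.2]
            -- col_has_galaxy[col]: the key is present under Pre_, so getD is exact there
            if st.2.getD p.1 false then acc else acc ++ [String.singleton p.2])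
          []])
      []

-- ===== PORT B =====
-- set comprehension {c for row in u for c, ch in enumerate(row) if ch == '#'} (inner generator)
def pvBGalaxyRow (row : String) (s : PySem.Set Int) : PySem.Set Int :=
  (PySem.List.enumerate row.toList 0).foldl
    (fun s p => if p.2 = '#' then s.add p.1 else s) s

def expanded_universe_alt (unexpanded_universe : List String) : List (List String) :=
  let galaxyCols : PySem.Set Int :=
    unexpanded_universe.foldl (fun s row => pvBGalaxyRow row s) (PySem.Set.ofList [])
  unexpanded_universe.foldl
    (fun result row =>
      -- [ch for c, ch in enumerate(row) for _ in range(1 if c in galaxy_cols else 2)]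
      let expanded := (PySem.List.enumerate row.toList 0).flatMap
        (fun p => if p.1 ∈ galaxyCols then [String.singleton p.2]
                  else [String.singleton p.2, String.singleton p.2])
      let result := result ++ [expanded]
      if PySem.Str.isIn "#" row then result else result ++ [expanded])
    []

-- ===== PRECONDITION & SPEC =====
-- Pre_ is exactly the inputs where Python A returns normally: it excludes the empty list (A raises
-- IndexError on unexpanded_universe[0]) and inputs where some row extends past the first row's
-- width over a column holding no galaxy anywhere (A's second loop raises KeyError there).
def Pre_expanded_universe (unexpanded_universe : List String) : Prop :=
  unexpanded_universe ≠ [] ∧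
  ∀ r ∈ unexpanded_universe, ∀ c ∈ List.range r.toList.length,
    (unexpanded_universe.headD "").toList.length ≤ c →
    ∃ r' ∈ unexpanded_universe, c < r'.toList.length ∧ r'.toList.getD c ' ' = '#'
instance (unexpanded_universe : List String) : Decidable (Pre_expanded_universe unexpanded_universe) := by
  unfold Pre_expanded_universe; infer_instance

def pvWitness_expanded_universe : List String := ["#.", ".."]

def Spec_expanded_universe (unexpanded_universe : List String) (out : List (List String)) : Prop := out = expanded_universe_alt unexpanded_universe
instance (unexpanded_universe : List String) (out : List (List String)) : Decidable (Spec_expanded_universe unexpanded_universe out) := by unfold Spec_expanded_universe; infer_instance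

-- ===== CLAIM (what is proved, stated in full; the proofs are below) =====
def Claim_equal_expanded_universe : Prop := ∀ (unexpanded_universe : List String), Dom_expanded_universe unexpanded_universe → Pre_expanded_universe unexpanded_universe → Spec_expanded_universe unexpanded_universe (expanded_universe unexpanded_universe)

-- ===== LEMMAS AND PROOFS =====

def pvRowsA (u : List String) : List String :=
  u.flatMap (fun row => if PySem.Str.isIn "#" row then [row] else [row, row])

def pvColHas (u : List String) (c : Nat) : Bool :=
  u.any (fun r => decide (c < r.toList.length) && (r.toList.getD c ' ' == '#'))

theorem pvFoldPair (u : List String) (a : List String) (d : PySem.Dict Int Bool) :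
    u.foldl (fun (st : List String × PySem.Dict Int Bool) row =>
        (if PySem.Str.isIn "#" row then st.1 ++ [row] else st.1 ++ [row] ++ [row],
         pvAUpdRow row st.2)) (a, d)
    = (a ++ pvRowsA u, u.foldl (fun d row => pvAUpdRow row d) d) := by
  induction u generalizing a d with
  | nil => simp [pvRowsA]
  | cons r u ih =>
    simp only [List.foldl_cons]
    rw [ih]
    simp only [pvRowsA, List.flatMap_cons]
    by_cases h : PySem.Chars.isIn ['#'] r.toList = true <;> simp [h]

theorem pvAUpdFold_getD (l : List Char) (s : Int) (d : PySem.Dict Int Bool) (k : Int) :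
    ((PySem.List.enumerate l s).foldl (fun d p => if p.2 = '#' then d.insert p.1 true else d) d).getD k false
    = (d.getD k false || (PySem.List.enumerate l s).any (fun p => p.1 == k && p.2 == '#')) := by
  induction l generalizing s d with
  | nil => simp [PySem.List.enumerate_nil]
  | cons c l ih =>
    rw [PySem.List.enumerate_cons]
    simp only [List.foldl_cons, List.any_cons]
    by_cases hc : c = '#'
    · subst hc
      rw [if_pos rfl, ih]
      by_cases hk : k = s
      · subst hk
        simp
      · have h1 : (s == k) = false := by simp [Ne.symm hk]
        simp [PySem.Dict.getD_insert, hk, h1]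
    · have h2 : (c == '#') = false := by simp [hc]
      rw [if_neg hc, ih]
      simp [h2]

theorem pvDictLoop_getD (u : List String) (d : PySem.Dict Int Bool) (k : Int) :
    (u.foldl (fun d row => pvAUpdRow row d) d).getD k false
    = (d.getD k false ||
       u.any (fun r => (PySem.List.enumerate r.toList 0).any (fun p => p.1 == k && p.2 == '#'))) := by
  induction u generalizing d with
  | nil => simp
  | cons r u ih =>
    simp only [List.foldl_cons, List.any_cons]
    rw [ih, pvAUpdRow, pvAUpdFold_getD, Bool.or_assoc]

theorem pvAnyEnum (l : List Char) (c : Nat) :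
    ((PySem.List.enumerate l 0).any (fun p => p.1 == (c : Int) && p.2 == '#'))
    = (decide (c < l.length) && (l.getD c ' ' == '#')) := by
  rw [Bool.eq_iff_iff]
  simp only [List.any_eq_true, PySem.List.mem_enumerate_iff, Bool.and_eq_true, beq_iff_eq,
    decide_eq_true_eq]
  constructor
  · rintro ⟨p, ⟨j, hj, rfl⟩, h1, h2⟩
    simp only [zero_add] at h1 h2
    have hj' : j = c := by exact_mod_cast h1
    subst hj'
    exact ⟨hj, by rw [List.getD_eq_getElem l ' ' hj]; exact h2⟩
  · rintro ⟨hlt, hc⟩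
    exact ⟨((c : Int), l[c]), ⟨c, hlt, by simp⟩, by simp, by rw [List.getD_eq_getElem l ' ' hlt] at hc; exact hc⟩

theorem pvInit_getD (L : List Int) (d : PySem.Dict Int Bool) (k : Int)
    (h : d.getD k false = false) :
    (L.foldl (fun d c => d.insert c false) d).getD k false = false := by
  induction L generalizing d with
  | nil => exact h
  | cons a L ih =>
    simp only [List.foldl_cons]
    exact ih _ (by rw [PySem.Dict.getD_insert]; split <;> simp [h])

theorem pvDictFull (u : List String) (d : PySem.Dict Int Bool)
    (hd : ∀ k, d.getD k false = false) (c : Nat) :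
    (u.foldl (fun d row => pvAUpdRow row d) d).getD (c : Int) false = pvColHas u c := by
  rw [pvDictLoop_getD, hd]
  simp only [Bool.false_or, pvColHas, pvAnyEnum]

theorem pvIteAppend (acc : List String) (b : Bool) (x : String) :
    (if b then acc ++ [x] else acc ++ [x] ++ [x]) = acc ++ (if b then [x] else [x, x]) := by
  cases b <;> simp

theorem pvA_closed (r0 : String) (rest : List String) :
    expanded_universe (r0 :: rest)
    = (pvRowsA (r0 :: rest)).map (fun row =>
        (List.range row.toList.length).flatMap (fun c =>
          if pvColHas (r0 :: rest) c then [String.singleton (row.toList.getD c ' ')]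
          else [String.singleton (row.toList.getD c ' '), String.singleton (row.toList.getD c ' ')])) := by
  have hinit : ∀ k, ((PySem.List.pyRange 0 (PySem.Str.len r0) 1).foldl
      (fun d c => d.insert c false) PySem.Dict.empty).getD k false = false :=
    fun k => pvInit_getD _ _ _ (by simp)
  have henum : ∀ xs : List Char, PySem.List.enumerate xs =
      (PySem.List.pyRange 0 (PySem.List.len xs)).map (fun j => (j, PySem.List.pyGetD xs j ' ')) :=
    fun xs => PySem.List.enumerate_eq_map_pyRange xs ' '
  simp only [expanded_universe]
  rw [pvFoldPair]
  simp only [List.nil_append, PySem.List.foldl_append_singleton_eq_map, pvIteAppend,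
    PySem.List.foldl_append_eq_flatMap, List.nil_append, henum, List.flatMap_map,
    PySem.List.len_eq, PySem.List.pyRange_zero_natCast, PySem.List.pyGetD_natCast]
  simp only [pvDictFull _ _ hinit]

theorem pvSetFold_mem (l : List Char) (s0 : Int) (S : PySem.Set Int) (k : Int) :
    (k ∈ (PySem.List.enumerate l s0).foldl (fun S p => if p.2 = '#' then S.add p.1 else S) S)
    ↔ (k ∈ S ∨ ((PySem.List.enumerate l s0).any fun p => p.1 == k && p.2 == '#') = true) := by
  induction l generalizing s0 S with
  | nil => simp [PySem.List.enumerate_nil]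
  | cons c l ih =>
    rw [PySem.List.enumerate_cons]
    simp only [List.foldl_cons, List.any_cons]
    rw [ih]
    by_cases hc : c = '#'
    · subst hc
      rw [if_pos rfl, PySem.Set.mem_add]
      have hkk : (s0 = k) ↔ (k = s0) := eq_comm
      simp only [Bool.or_eq_true, Bool.and_eq_true, beq_iff_eq, beq_self_eq_true, and_true]
      tauto
    · rw [if_neg hc]
      have h2 : (c == '#') = false := by simp [hc]
      simp [h2]

theorem pvGalaxyLoop_mem (u : List String) (S : PySem.Set Int) (k : Int) :
    (k ∈ u.foldl (fun s row => pvBGalaxyRow row s) S)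
    ↔ (k ∈ S ∨
       (u.any fun r => (PySem.List.enumerate r.toList 0).any fun p => p.1 == k && p.2 == '#') = true) := by
  induction u generalizing S with
  | nil => simp
  | cons r u ih =>
    simp only [List.foldl_cons, List.any_cons]
    rw [ih, pvBGalaxyRow, pvSetFold_mem]
    simp only [Bool.or_eq_true]
    tauto

theorem pvGalaxyMem (u : List String) (c : Nat) :
    ((c : Int) ∈ u.foldl (fun s row => pvBGalaxyRow row s) (PySem.Set.ofList []))
    ↔ pvColHas u c = true := by
  rw [pvGalaxyLoop_mem,
    show ((c : Int) ∈ PySem.Set.ofList ([] : List Int)) ↔ False from by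
      rw [show PySem.Set.ofList ([] : List Int) = [] from rfl]; simp,
    false_or]
  simp only [pvAnyEnum, pvColHas]

theorem pvBFold (E : String → List String) (u : List String) (acc : List (List String)) :
    u.foldl (fun result row =>
        if PySem.Str.isIn "#" row then result ++ [E row] else result ++ [E row] ++ [E row]) acc
    = acc ++ u.flatMap (fun row =>
        if PySem.Str.isIn "#" row then [E row] else [E row, E row]) := by
  induction u generalizing acc with
  | nil => simp
  | cons r u ih =>
    simp only [List.foldl_cons, List.flatMap_cons]
    rw [ih]
    by_cases h : PySem.Chars.isIn ['#'] r.toList = true <;> simp [h]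

theorem pvRowsA_map (u : List String) (F : String → List String) :
    (pvRowsA u).map F
    = u.flatMap (fun row => if PySem.Str.isIn "#" row then [F row] else [F row, F row]) := by
  rw [pvRowsA, List.map_flatMap]
  simp only [apply_ite (List.map F), List.map_cons, List.map_nil]

theorem pvB_closed (u : List String) :
    expanded_universe_alt u
    = (pvRowsA u).map (fun row =>
        (List.range row.toList.length).flatMap (fun c =>
          if pvColHas u c then [String.singleton (row.toList.getD c ' ')]
          else [String.singleton (row.toList.getD c ' '), String.singleton (row.toList.getD c ' ')])) := by
  have henum : ∀ xs : List Char, PySem.List.enumerate xs =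
      (PySem.List.pyRange 0 (PySem.List.len xs)).map (fun j => (j, PySem.List.pyGetD xs j ' ')) :=
    fun xs => PySem.List.enumerate_eq_map_pyRange xs ' '
  simp only [expanded_universe_alt]
  rw [pvBFold]
  simp only [List.nil_append, henum, List.flatMap_map, PySem.List.len_eq,
    PySem.List.pyRange_zero_natCast, PySem.List.pyGetD_natCast]
  simp only [pvGalaxyMem]
  rw [pvRowsA_map]

theorem pvMain (u : List String) (hne : u ≠ []) :
    expanded_universe u = expanded_universe_alt u := by
  obtain ⟨r0, rest, rfl⟩ : ∃ r0 rest, u = r0 :: rest := by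
    cases u with
    | nil => exact absurd rfl hne
    | cons a b => exact ⟨a, b, rfl⟩
  rw [pvA_closed, pvB_closed]

-- ===== VERDICT (by name: the statement is the Claim_ definition above) =====
theorem expanded_universe_spec : Claim_equal_expanded_universe := by
  intro u _ hpre
  unfold Spec_expanded_universe
  exact pvMain u hpre.1
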